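-- pv_equiv track=rewrite | github.com/Zimmermann25/InterviewBit | Strings/Python/AmazingSubarrays.py | solve
-- ===== SOURCE A (Python) =====
-- def solve(A):
--     A = A.lower()
--     output = 0
--     for i in range(len(A)):
--         #counter = i # od ktorego indeksu sprawdzac dalej
--         curLetter = A[i]
--         if (curLetter=='a' or curLetter=='e' or curLetter=='i' or curLetter=='o' or curLetter=='u'):
--             output += (len(A) - i)
--             output %=10003
--     return output % 10003
-- ===== SOURCE B (Python) =====
-- def solve(A):
--     vowels_so_far = 0
--     output = 0
--     for ch in A.lower():
--         if ch in ('a', 'e', 'i', 'o', 'u'):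
--             vowels_so_far += 1
--         output += vowels_so_far
--     return output % 10003
-- ===== Notes on version B (the rewrite author's own statement) =====
-- stated objective: simpler
-- what changed: Instead of indexing into the string and adding (len-i) with an inner mod per vowel, B makes one index-free pass keeping a running count of vowels seen so far and adds that count at every character, taking the modulus once at the end.
import Mathlib
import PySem

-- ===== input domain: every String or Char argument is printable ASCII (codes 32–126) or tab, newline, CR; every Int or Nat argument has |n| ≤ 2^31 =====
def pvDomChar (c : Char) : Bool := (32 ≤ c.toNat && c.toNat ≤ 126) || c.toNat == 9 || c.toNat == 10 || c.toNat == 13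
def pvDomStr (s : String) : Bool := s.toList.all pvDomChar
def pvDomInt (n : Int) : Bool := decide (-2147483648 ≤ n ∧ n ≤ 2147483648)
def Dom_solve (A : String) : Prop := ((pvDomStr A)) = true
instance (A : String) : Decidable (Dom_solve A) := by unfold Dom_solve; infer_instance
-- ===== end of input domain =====

-- B replaces A's index-based loop (add len-i per vowel, mod inside) by an index-free pass
-- keeping a running vowel count added at each character; same result, plainer code.

-- ===== PORT A =====
def solve (A : String) : Int :=
  let Al := PySem.Str.lower A
  let output : Int :=
    (PySem.List.pyRange 0 (PySem.Str.len Al) 1).foldl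
      (fun output i =>
        match PySem.Str.pyGet? Al i with
        | some curLetter =>
            if curLetter == 'a' || curLetter == 'e' || curLetter == 'i' ||
               curLetter == 'o' || curLetter == 'u' then
              PySem.Int.mod (output + (PySem.Str.len Al - i)) 10003
            else output
        | none => output) 0
  PySem.Int.mod output 10003

-- ===== PORT B =====
def solve_alt (A : String) : Int :=
  let st :=
    (PySem.Str.lower A).toList.foldl
      (fun (st : Int × Int) ch =>
        let v := if ['a', 'e', 'i', 'o', 'u'].contains ch then st.1 + 1 else st.1
        (v, st.2 + v)) (0, 0)
  PySem.Int.mod st.2 10003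

-- ===== PRECONDITION & SPEC =====
def Spec_solve (A : String) (out : Int) : Prop := out = solve_alt A
instance (A : String) (out : Int) : Decidable (Spec_solve A out) := by unfold Spec_solve; infer_instance

-- ===== CLAIM (what is proved, stated in full; the proofs are below) =====
def Claim_equal_solve : Prop := ∀ (A : String), Dom_solve A → Spec_solve A (solve A)

-- ===== LEMMAS AND PROOFS =====

/-- The vowel test both programs use. -/
def vow (c : Char) : Bool :=
  c == 'a' || c == 'e' || c == 'i' || c == 'o' || c == 'u'

/-- Reference value: each vowel at the head of a suffix contributes the suffix length. -/
def refA : List Char → Int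
  | [] => 0
  | c :: t => (if vow c then (t.length : Int) + 1 else 0) + refA t

lemma mod10003 (a : Int) : PySem.Int.mod a 10003 = a % 10003 :=
  PySem.Int.mod_eq_emod_of_pos (by norm_num)

/-- A's loop, started at index `pre.length`, computes `acc + refA suf` modulo 10003. -/
lemma loopA (s : String) : ∀ (suf pre : List Char) (acc : Int), s.toList = pre ++ suf →
    PySem.Int.mod
      ((PySem.List.pyRange (pre.length : Int) (PySem.Str.len s) 1).foldl
        (fun output i =>
          match PySem.Str.pyGet? s i with
          | some curLetter =>
              if curLetter == 'a' || curLetter == 'e' || curLetter == 'i' ||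
                 curLetter == 'o' || curLetter == 'u' then
                PySem.Int.mod (output + (PySem.Str.len s - i)) 10003
              else output
          | none => output) acc) 10003
    = PySem.Int.mod (acc + refA suf) 10003 := by
  intro suf
  induction suf with
  | nil =>
    intro pre acc h
    have hl : PySem.Str.len s = (pre.length : Int) := by simp [h]
    rw [hl, PySem.List.pyRange_one_eq_nil le_rfl]
    simp [refA]
  | cons c t ih =>
    intro pre acc h
    have hl : PySem.Str.len s = (pre.length : Int) + (t.length : Int) + 1 := by
      simp [h]; ring
    have hlt : (pre.length : Int) < PySem.Str.len s := by rw [hl]; omega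
    have hget : PySem.Str.pyGet? s (pre.length : Int) = some c := by simp [h]
    rw [PySem.List.pyRange_one_cons hlt, List.foldl_cons, hget]
    have hpre : ((pre ++ [c]).length : Int) = (pre.length : Int) + 1 := by simp
    have h' : s.toList = (pre ++ [c]) ++ t := by simp [h]
    have ihx := ih (pre ++ [c])
    rw [hpre] at ihx
    by_cases hc : (c == 'a' || c == 'e' || c == 'i' || c == 'o' || c == 'u') = true
    · simp only
      rw [if_pos hc, ihx _ h']
      have hv : vow c = true := hc
      simp only [refA, hv, if_true, hl, mod10003]
      omega
    · simp only
      rw [if_neg hc, ihx _ h']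
      have hv : vow c = false := by simpa [vow] using hc
      simp [refA, hv]

lemma contains_eq_vow (c : Char) : (['a', 'e', 'i', 'o', 'u'].contains c) = vow c := by
  by_cases h1 : c = 'a' <;> by_cases h2 : c = 'e' <;> by_cases h3 : c = 'i' <;>
    by_cases h4 : c = 'o' <;> by_cases h5 : c = 'u' <;> simp [vow, h1, h2, h3, h4, h5]

/-- B's loop adds `v·len + refA l` to the running total. -/
lemma loopB : ∀ (l : List Char) (v out : Int),
    (l.foldl
      (fun (st : Int × Int) ch =>
        let v := if ['a', 'e', 'i', 'o', 'u'].contains ch then st.1 + 1 else st.1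
        (v, st.2 + v)) (v, out)).2
    = out + v * l.length + refA l := by
  intro l
  induction l with
  | nil => intro v out; simp [refA]
  | cons c t ih =>
    intro v out
    rw [List.foldl_cons]
    have hcv := contains_eq_vow c
    by_cases hc : (['a', 'e', 'i', 'o', 'u'].contains c) = true
    · have hv : vow c = true := by rw [← hcv]; exact hc
      simp only [hc, if_true]
      rw [ih]
      simp only [refA, hv, if_true]
      push_cast [List.length_cons]; ring
    · have hv : vow c = false := by rw [← hcv]; simpa using hc
      simp only [hc, Bool.false_eq_true, if_false]
      rw [ih]
      simp only [refA, hv, Bool.false_eq_true, if_false]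
      push_cast [List.length_cons]; ring

-- ===== VERDICT (by name: the statement is the Claim_ definition above) =====
theorem solve_spec : Claim_equal_solve := by
  intro A _
  unfold Spec_solve solve solve_alt
  have hA := loopA (PySem.Str.lower A) ((PySem.Str.lower A).toList) [] 0 rfl
  simp only [List.length_nil, Int.natCast_zero] at hA
  rw [hA]
  show PySem.Int.mod (0 + refA (PySem.Str.lower A).toList) 10003 =
    PySem.Int.mod
      ((PySem.Str.lower A).toList.foldl
        (fun (st : Int × Int) ch =>
          let v := if ['a', 'e', 'i', 'o', 'u'].contains ch then st.1 + 1 else st.1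
          (v, st.2 + v)) (0, 0)).2 10003
  rw [loopB]
  norm_num
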